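-- pv_equiv track=rewrite | github.com/liwen-tj/RecommendSystem | apriori.py | powerSetsBinary
-- ===== SOURCE A (Python) =====
-- def powerSetsBinary(items):
--     """ calculate subset (items should be list) """
--     results = []
--     # generate all combination of N items
--     N = len(items)
--     # enumerate the 2**N possible combinations
--     for i in range(1, 2**N-1):
--         left_items = set()
--         right_items = set()
--         for j in range(N):
--             # test jth bit of integer i
--             if(i >> j) % 2 == 1:
--                 left_items.add(items[j])
--             else:
--                 right_items.add(items[j])
--         results.append([left_items, right_items])
--     return results
-- ===== SOURCE B (Python) =====
-- def powerSetsBinary(items):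
--     """ calculate subset (items should be list) """
--     # grow a frontier of partial bipartitions (as index-ordered tuples) by
--     # doubling: each new item goes right (first half) or left (second half),
--     # so item j acts as bit j
--     parts = [((), ())]
--     for item in items:
--         parts = [(left, right + (item,)) for (left, right) in parts] + \
--                 [(left + (item,), right) for (left, right) in parts]
--     # drop the all-right (index 0) and all-left (last) trivial partitions
--     return [[set(left), set(right)] for (left, right) in parts[1:-1]]
-- ===== Notes on version B (the rewrite author's own statement) =====
-- stated objective: alternative
-- what changed: Replaces the per-integer bitmask enumeration (outer loop over 2**N counters with an inner bit-testing loop over all items) by an incremental frontier of partial bipartitions (index-ordered tuples) that doubles once per item, slices off the two trivial endpoints and materialises the sets at the end.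
import Mathlib
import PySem

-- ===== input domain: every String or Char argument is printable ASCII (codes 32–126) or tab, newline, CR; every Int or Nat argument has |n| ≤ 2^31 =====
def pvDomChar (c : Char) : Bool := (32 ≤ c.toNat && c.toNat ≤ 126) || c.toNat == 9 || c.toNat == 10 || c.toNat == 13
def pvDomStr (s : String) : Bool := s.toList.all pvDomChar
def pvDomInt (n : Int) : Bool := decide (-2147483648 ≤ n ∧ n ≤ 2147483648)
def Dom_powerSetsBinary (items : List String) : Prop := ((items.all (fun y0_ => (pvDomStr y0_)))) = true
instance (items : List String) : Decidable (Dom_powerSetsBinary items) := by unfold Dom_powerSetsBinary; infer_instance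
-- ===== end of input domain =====

-- B replaces A's per-integer bit-testing enumeration by an incremental doubling of partial
-- bipartitions (objective: alternative decomposition, same asymptotic cost).

-- ===== PORT A =====
-- loop body of A: for a counter i, split items by the bits of i (bit j of i = items[j] goes left)
def pvInnerA (items : List String) (i : Int) : PySem.Set String × PySem.Set String :=
  (PySem.List.pyRange 0 (items.length : Int) 1).foldl
    (fun (lr : PySem.Set String × PySem.Set String) j =>
      -- Python `(i >> j) % 2 == 1`; 0 ≤ j here so `j.toNat` is exact, `>>>` is Python's `>>`
      if PySem.Int.mod (i >>> j.toNat) 2 == 1 then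
        (PySem.Set.add lr.1 (PySem.List.pyGetD items j ""), lr.2)
      else
        (lr.1, PySem.Set.add lr.2 (PySem.List.pyGetD items j "")))
    (PySem.Set.empty, PySem.Set.empty)

-- results.append([left_items, right_items])
def pvOneA (items : List String) (i : Int) : List (List String) :=
  [(pvInnerA items i).1, (pvInnerA items i).2]

def powerSetsBinary (items : List String) : List (List (List String)) :=
  -- for i in range(1, 2**N - 1): results.append([left_items, right_items])
  (PySem.List.pyRange 1 ((2 : Int) ^ items.length - 1) 1).foldl
    (fun results i => results ++ [pvOneA items i]) []

-- ===== PORT B =====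
-- loop body of B: double the frontier of index-ordered tuple pairs
-- (right-copies first, then left-copies)
def pvStepB (ps : List (List String × List String)) (item : String) :
    List (List String × List String) :=
  ps.map (fun p => (p.1, p.2 ++ [item])) ++ ps.map (fun p => (p.1 ++ [item], p.2))

def powerSetsBinary_alt (items : List String) : List (List (List String)) :=
  (PySem.List.slice (items.foldl pvStepB [([], [])])
    (some 1) (some (-1))).map (fun p => [PySem.Set.ofList p.1, PySem.Set.ofList p.2])

-- ===== PRECONDITION & SPEC =====
def Spec_powerSetsBinary (items : List String) (out : List (List (List String))) : Prop := out = powerSetsBinary_alt items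
instance (items : List String) (out : List (List (List String))) : Decidable (Spec_powerSetsBinary items out) := by unfold Spec_powerSetsBinary; infer_instance

-- ===== CLAIM (what is proved, stated in full; the proofs are below) =====
def Claim_equal_powerSetsBinary : Prop := ∀ (items : List String), Dom_powerSetsBinary items → Spec_powerSetsBinary items (powerSetsBinary items)

-- ===== LEMMAS AND PROOFS =====

-- the bipartition determined by the binary digits of n (least significant bit first)
def pvPart : List String → Nat → (PySem.Set String × PySem.Set String) → (PySem.Set String × PySem.Set String)
  | [], _, acc => acc
  | x :: xs, n, acc =>
      pvPart xs (n / 2)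
        (if n % 2 = 1 then (PySem.Set.add acc.1 x, acc.2) else (acc.1, PySem.Set.add acc.2 x))

-- the same bipartition kept as raw index-ordered lists (B's frontier entries)
def pvPartL : List String → Nat → (List String × List String) → (List String × List String)
  | [], _, acc => acc
  | x :: xs, n, acc =>
      pvPartL xs (n / 2)
        (if n % 2 = 1 then (acc.1 ++ [x], acc.2) else (acc.1, acc.2 ++ [x]))

theorem pvPartL_add_pow (xs : List String) : ∀ (n q : Nat) (acc : List String × List String),
    pvPartL xs (n + 2 ^ xs.length * q) acc = pvPartL xs n acc := by
  induction xs with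
  | nil => intro n q acc; rfl
  | cons x xs ih =>
      intro n q acc
      have h : n + 2 ^ (x :: xs).length * q = n + 2 * (2 ^ xs.length * q) := by
        simp [List.length_cons, pow_succ]; ring
      rw [h]
      show pvPartL xs ((n + 2 * (2 ^ xs.length * q)) / 2) _ = pvPartL xs (n / 2) _
      rw [Nat.add_mul_div_left _ _ (by norm_num : 0 < 2), Nat.add_mul_mod_self_left]
      rw [ih]

theorem pvPartL_snoc (xs : List String) : ∀ (x : String) (n : Nat) (acc : List String × List String),
    pvPartL (xs ++ [x]) n acc =
      (if (n / 2 ^ xs.length) % 2 = 1 then ((pvPartL xs n acc).1 ++ [x], (pvPartL xs n acc).2)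
       else ((pvPartL xs n acc).1, (pvPartL xs n acc).2 ++ [x])) := by
  induction xs with
  | nil => intro x n acc; simp [pvPartL]
  | cons y xs ih =>
      intro x n acc
      show pvPartL (xs ++ [x]) (n / 2) _ = _
      rw [ih]
      have h : n / 2 / 2 ^ xs.length = n / 2 ^ (y :: xs).length := by
        rw [Nat.div_div_eq_div_mul, List.length_cons, pow_succ, mul_comm]
      rw [h]
      rfl

-- invariant of B's doubling loop
theorem pvB_inv (items : List String) :
    items.foldl pvStepB [([], [])] =
      (List.range (2 ^ items.length)).map (fun n => pvPartL items n ([], [])) := by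
  induction items using List.reverseRecOn with
  | nil => rfl
  | append_singleton xs x ih =>
      rw [List.foldl_append, List.foldl_cons, List.foldl_nil, ih]
      have hlen : 2 ^ (xs ++ [x]).length = 2 ^ xs.length + 2 ^ xs.length := by
        simp [pow_succ]; ring
      rw [hlen, List.range_add]
      unfold pvStepB
      rw [List.map_append]
      congr 1
      · rw [List.map_map]
        apply List.map_congr_left
        intro n hn
        have hn' : n < 2 ^ xs.length := List.mem_range.mp hn
        simp only [Function.comp_apply]
        rw [pvPartL_snoc, Nat.div_eq_of_lt hn']
        simp
      · rw [List.map_map, List.map_map]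
        apply List.map_congr_left
        intro n hn
        have hn' : n < 2 ^ xs.length := List.mem_range.mp hn
        simp only [Function.comp_apply]
        have h1 : 2 ^ xs.length + n = n + 2 ^ xs.length * 1 := by ring
        rw [h1, pvPartL_snoc, pvPartL_add_pow]
        have h2 : (n + 2 ^ xs.length * 1) / 2 ^ xs.length = 1 := by
          rw [Nat.add_mul_div_left _ _ (Nat.two_pow_pos _),
            Nat.div_eq_of_lt hn']
        rw [h2]
        simp

-- A's inner loop over Nat indices equals pvPart
theorem pvInner_nat (items : List String) : ∀ (n : Nat) (acc : PySem.Set String × PySem.Set String),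
    (List.range items.length).foldl
      (fun (lr : PySem.Set String × PySem.Set String) (j : Nat) =>
        if (n >>> j) % 2 = 1 then (PySem.Set.add lr.1 (items.getD j ""), lr.2)
        else (lr.1, PySem.Set.add lr.2 (items.getD j ""))) acc = pvPart items n acc := by
  induction items with
  | nil => intro n acc; rfl
  | cons x xs ih =>
      intro n acc
      rw [List.length_cons, List.range_succ_eq_map, List.foldl_cons, List.foldl_map]
      simp only [Nat.shiftRight_zero, List.getD_cons_zero, List.getD_cons_succ]
      have hb : ∀ j : Nat, n >>> (Nat.succ j) = (n / 2) >>> j := by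
        intro j
        rw [Nat.succ_eq_add_one, Nat.add_comm, Nat.shiftRight_add, Nat.shiftRight_one]
      simp only [hb]
      exact ih (n / 2) _

theorem pvOneA_eq (items : List String) (n : Nat) :
    pvOneA items ((n : Int)) =
      [(pvPart items n (PySem.Set.empty, PySem.Set.empty)).1,
       (pvPart items n (PySem.Set.empty, PySem.Set.empty)).2] := by
  suffices h : pvInnerA items ((n : Int)) = pvPart items n (PySem.Set.empty, PySem.Set.empty) by
    unfold pvOneA; rw [h]
  unfold pvInnerA
  rw [PySem.List.pyRange_zero_nat, List.foldl_map]
  rw [← pvInner_nat items n]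
  congr 1
  funext lr j
  have hsh : ((n : Int) >>> ((j : Nat) : Int)) = ((n >>> j : Nat) : Int) := by
    simp
  have hmod : PySem.Int.mod (((n >>> j) : Nat) : Int) 2 = ((((n >>> j) % 2) : Nat) : Int) := by
    exact_mod_cast PySem.Int.mod_natCast (n >>> j) 2
  simp only [Int.toNat_natCast, hsh, hmod, PySem.List.pyGetD_natCast]
  by_cases h : (n >>> j) % 2 = 1
  · norm_num [h]
  · have h0 : (n >>> j) % 2 = 0 := by omega
    norm_num [h0, h]

-- building the sets at the end from B's index-ordered lists gives A's sets
theorem pvPart_ofList (items : List String) : ∀ (n : Nat) (l1 l2 : List String),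
    pvPart items n (PySem.Set.ofList l1, PySem.Set.ofList l2) =
      (PySem.Set.ofList (pvPartL items n (l1, l2)).1,
       PySem.Set.ofList (pvPartL items n (l1, l2)).2) := by
  have hadd : ∀ (l : List String) (x : String),
      PySem.Set.add (PySem.Set.ofList l) x = PySem.Set.ofList (l ++ [x]) := by
    intro l x
    rw [PySem.Set.ofList_eq_foldl, PySem.Set.ofList_eq_foldl, List.foldl_append]
    rfl
  induction items with
  | nil => intro n l1 l2; rfl
  | cons x xs ih =>
      intro n l1 l2
      by_cases h : n % 2 = 1 <;> simp [pvPart, pvPartL, h, hadd, ih]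

-- ===== VERDICT (by name: the statement is the Claim_ definition above) =====
theorem powerSetsBinary_spec : Claim_equal_powerSetsBinary := by
  intro items _
  unfold Spec_powerSetsBinary
  unfold powerSetsBinary powerSetsBinary_alt
  rw [pvB_inv]
  -- A side: turn the append-loop into a map over range(2^N - 2)
  rw [PySem.List.foldl_append_singleton_eq_map, PySem.List.pyRange_one]
  have hN : ((2 : Int) ^ items.length - 1 - 1).toNat = 2 ^ items.length - 2 := by
    have : ((2 : Int) ^ items.length) = ((2 ^ items.length : Nat) : Int) := by push_cast; ring
    rw [this]; omega
  rw [hN]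
  -- B side: compute the [1:-1] slice
  have hpos : 1 ≤ 2 ^ items.length := Nat.one_le_two_pow
  have hslice : ∀ (l : List (List String × List String)),
      PySem.List.slice l (some 1) (some (-1)) = (l.tail).take (l.length - 2) := by
    intro l
    cases l with
    | nil => rfl
    | cons a l =>
        simp [PySem.List.slice, PySem.List.clampIdx]
        split_ifs <;> omega
  rw [hslice, List.nil_append]
  have hlen : ((List.range (2 ^ items.length)).map
      (fun n => pvPartL items n ([], []))).length = 2 ^ items.length := by
    simp
  rw [hlen]
  have hsucc : 2 ^ items.length = (2 ^ items.length - 1) + 1 := by omega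
  rw [hsucc, List.range_succ_eq_map, List.map_cons, List.tail_cons]
  have hM : 2 ^ items.length - 1 + 1 - 2 = 2 ^ items.length - 2 := by omega
  rw [hM, ← List.map_take, ← List.map_take, List.take_range]
  rw [show min (2 ^ items.length - 2) (2 ^ items.length - 1) = 2 ^ items.length - 2 from by omega]
  rw [List.map_map, List.map_map, List.map_map]
  apply List.map_congr_left
  intro k _
  simp only [Function.comp_apply]
  have hcast : (1 : Int) + (k : Int) = ((Nat.succ k : Nat) : Int) := by push_cast; omega
  rw [hcast, pvOneA_eq]
  rw [show (PySem.Set.empty : PySem.Set String) = PySem.Set.ofList [] from rfl,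
    pvPart_ofList items (Nat.succ k) [] []]
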